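-- pv_equiv track=rewrite | github.com/pjdrm/BeamSeg | src/topic_identification_plots.py | count_cross_doc_topics
-- ===== SOURCE A (Python) =====
-- def count_cross_doc_topics(ref_d1, ref_d2, hyp_d1, hyp_d2):
--     total = 0
--     prev_k = hyp_d1[0]
--     found_match = False
--     for i in range(len(hyp_d1)):
--         ref_d1_k = ref_d1[i]
--         hyp_d1_k = hyp_d1[i]
--         if found_match and hyp_d1_k == prev_k:
--             continue
--         else:
--             found_match = False
--         for j in range(len(hyp_d2)):
--             ref_d2_k = ref_d2[j]
--             hyp_d2_k = hyp_d2[j]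
--             if ref_d1_k == ref_d2_k and hyp_d1_k == hyp_d2_k:
--                 total += 1
--                 found_match = True
--                 break
--         prev_k = hyp_d1_k
--     return total
-- ===== SOURCE B (Python) =====
-- def count_cross_doc_topics(ref_d1, ref_d2, hyp_d1, hyp_d2):
--     pairs = set(zip(ref_d2, hyp_d2))
--     total = 0
--     n = len(hyp_d1)
--     i = 0
--     while i < n:
--         j = i + 1
--         while j < n and hyp_d1[j] == hyp_d1[i]:
--             j += 1
--         if any((ref_d1[p], hyp_d1[p]) in pairs for p in range(i, j)):
--             total += 1
--         i = j
--     return total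
-- ===== Notes on version B (the rewrite author's own statement) =====
-- stated objective: faster
-- what changed: B precomputes the set of (ref_d2,hyp_d2) pairs once and walks hyp_d1 in maximal runs of equal values, counting a run iff any of its positions has its pair in the set, replacing A's per-position inner linear scan and found_match/prev_k carry flag.
-- outside the precondition, e.g. on count_cross_doc_topics([1], [1], [1], [1, 2]): A returns 1, B returns 1
import Mathlib
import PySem

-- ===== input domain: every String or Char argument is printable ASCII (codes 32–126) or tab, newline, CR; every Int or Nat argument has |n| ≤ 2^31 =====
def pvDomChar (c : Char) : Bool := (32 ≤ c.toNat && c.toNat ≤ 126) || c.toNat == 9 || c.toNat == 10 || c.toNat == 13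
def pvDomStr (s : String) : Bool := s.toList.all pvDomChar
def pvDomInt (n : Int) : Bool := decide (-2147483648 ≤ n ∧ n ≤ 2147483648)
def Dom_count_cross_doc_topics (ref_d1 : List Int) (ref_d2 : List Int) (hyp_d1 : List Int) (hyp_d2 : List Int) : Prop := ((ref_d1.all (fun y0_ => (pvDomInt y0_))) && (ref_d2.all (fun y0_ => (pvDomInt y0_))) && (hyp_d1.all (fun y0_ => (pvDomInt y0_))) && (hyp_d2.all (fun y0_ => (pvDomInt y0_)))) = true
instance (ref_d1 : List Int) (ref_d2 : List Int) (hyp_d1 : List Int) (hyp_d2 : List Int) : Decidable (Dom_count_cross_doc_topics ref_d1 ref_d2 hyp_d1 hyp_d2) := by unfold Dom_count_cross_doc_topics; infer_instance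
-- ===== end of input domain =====

-- B replaces A's inner linear scan with a precomputed pair set and an explicit walk over maximal runs of
-- equal hyp_d1 values (objective: faster, O(n+m) vs O(n*m)).

-- ===== PORT A =====
-- inner 'for j in range(len(hyp_d2)): … break' of A, scanning from index j
def aFind (ref_d2 hyp_d2 : List Int) (a b : Int) (j : Nat) : Bool :=
  if j < hyp_d2.length then
    if ref_d2.getD j 0 = a ∧ hyp_d2.getD j 0 = b then true
    else aFind ref_d2 hyp_d2 a b (j+1)
  else false
termination_by hyp_d2.length - j

-- outer loop of A with state (total, prev_k, found_match); indices valid under Pre_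
def aGo (ref_d1 ref_d2 hyp_d1 hyp_d2 : List Int) (i : Nat) (total : Int) (prev : Int) (found : Bool) : Int :=
  if i < hyp_d1.length then
    if found = true ∧ hyp_d1.getD i 0 = prev then
      aGo ref_d1 ref_d2 hyp_d1 hyp_d2 (i+1) total prev found
    else
      if aFind ref_d2 hyp_d2 (ref_d1.getD i 0) (hyp_d1.getD i 0) 0 then
        aGo ref_d1 ref_d2 hyp_d1 hyp_d2 (i+1) (total + 1) (hyp_d1.getD i 0) true
      else
        aGo ref_d1 ref_d2 hyp_d1 hyp_d2 (i+1) total (hyp_d1.getD i 0) false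
  else total
termination_by hyp_d1.length - i

def count_cross_doc_topics (ref_d1 : List Int) (ref_d2 : List Int) (hyp_d1 : List Int) (hyp_d2 : List Int) : Int :=
  aGo ref_d1 ref_d2 hyp_d1 hyp_d2 0 0 (hyp_d1.getD 0 0) false

-- ===== PORT B =====
-- inner 'while j < n and hyp_d1[j] == hyp_d1[i]' of B: first index ≥ j whose value differs from v
def runEnd (hyp_d1 : List Int) (v : Int) (j : Nat) : Nat :=
  if j < hyp_d1.length ∧ hyp_d1.getD j 0 = v then runEnd hyp_d1 v (j+1) else j
termination_by hyp_d1.length - j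

theorem le_runEnd (hyp_d1 : List Int) (v : Int) (j : Nat) : j ≤ runEnd hyp_d1 v j := by
  fun_induction runEnd with
  | case1 j h ih => omega
  | case2 j h => omega

-- 'any((ref_d1[p], hyp_d1[p]) in pairs for p in range(i, j))'
def anyMatch (pairs : PySem.Set (Int × Int)) (ref_d1 hyp_d1 : List Int) (i j : Nat) : Bool :=
  (List.range' i (j - i)).any (fun p => PySem.Set.contains pairs (ref_d1.getD p 0, hyp_d1.getD p 0))

-- outer 'while i < n' of B, one step per maximal run
def bGo (pairs : PySem.Set (Int × Int)) (ref_d1 hyp_d1 : List Int) (i : Nat) (total : Int) : Int :=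
  if i < hyp_d1.length then
    let j := runEnd hyp_d1 (hyp_d1.getD i 0) (i+1)
    bGo pairs ref_d1 hyp_d1 j (if anyMatch pairs ref_d1 hyp_d1 i j then total + 1 else total)
  else total
termination_by hyp_d1.length - i
decreasing_by
  have := le_runEnd hyp_d1 (hyp_d1.getD i 0) (i+1)
  omega

def count_cross_doc_topics_alt (ref_d1 : List Int) (ref_d2 : List Int) (hyp_d1 : List Int) (hyp_d2 : List Int) : Int :=
  bGo (PySem.Set.ofList (ref_d2.zip hyp_d2)) ref_d1 hyp_d1 0 0

-- ===== PRECONDITION & SPEC =====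
-- Pre_ excludes: empty hyp_d1 and ref_d1 shorter than hyp_d1 (A raises IndexError there), and
-- ref_d2 shorter than hyp_d2, where A's exception behaviour is order-dependent (it raises unless every
-- scanned position breaks early) while B's set(zip) silently truncates.
def Pre_count_cross_doc_topics (ref_d1 : List Int) (ref_d2 : List Int) (hyp_d1 : List Int) (hyp_d2 : List Int) : Prop :=
  hyp_d1 ≠ [] ∧ hyp_d1.length ≤ ref_d1.length ∧ hyp_d2.length ≤ ref_d2.length
instance (ref_d1 : List Int) (ref_d2 : List Int) (hyp_d1 : List Int) (hyp_d2 : List Int) : Decidable (Pre_count_cross_doc_topics ref_d1 ref_d2 hyp_d1 hyp_d2) := by unfold Pre_count_cross_doc_topics; infer_instance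

def pvWitness_count_cross_doc_topics : List Int × List Int × List Int × List Int :=
  ([1, 2, 1], [1, 2], [5, 5, 6], [5, 6])

def Spec_count_cross_doc_topics (ref_d1 : List Int) (ref_d2 : List Int) (hyp_d1 : List Int) (hyp_d2 : List Int) (out : Int) : Prop := out = count_cross_doc_topics_alt ref_d1 ref_d2 hyp_d1 hyp_d2
instance (ref_d1 : List Int) (ref_d2 : List Int) (hyp_d1 : List Int) (hyp_d2 : List Int) (out : Int) : Decidable (Spec_count_cross_doc_topics ref_d1 ref_d2 hyp_d1 hyp_d2 out) := by unfold Spec_count_cross_doc_topics; infer_instance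

-- ===== CLAIM (what is proved, stated in full; the proofs are below) =====
def Claim_equal_count_cross_doc_topics : Prop := ∀ (ref_d1 : List Int) (ref_d2 : List Int) (hyp_d1 : List Int) (hyp_d2 : List Int), Dom_count_cross_doc_topics ref_d1 ref_d2 hyp_d1 hyp_d2 → Pre_count_cross_doc_topics ref_d1 ref_d2 hyp_d1 hyp_d2 → Spec_count_cross_doc_topics ref_d1 ref_d2 hyp_d1 hyp_d2 (count_cross_doc_topics ref_d1 ref_d2 hyp_d1 hyp_d2)

-- ===== LEMMAS AND PROOFS =====

-- A's inner scan finds (a,b) iff it occurs in zip ref_d2 hyp_d2 (from index j on), given hyp_d2 not longer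
theorem aFind_iff (ref_d2 hyp_d2 : List Int) (a b : Int)
    (hlen : hyp_d2.length ≤ ref_d2.length) (j : Nat) :
    aFind ref_d2 hyp_d2 a b j = true ↔
      ∃ q, j ≤ q ∧ q < hyp_d2.length ∧ ref_d2.getD q 0 = a ∧ hyp_d2.getD q 0 = b := by
  fun_induction aFind with
  | case1 j hj hm =>
    simp only [true_iff]
    exact ⟨j, le_refl j, hj, hm.1, hm.2⟩
  | case2 j hj hm ih =>
    rw [ih]
    constructor
    · rintro ⟨q, hq1, hq2, hq3⟩; exact ⟨q, by omega, hq2, hq3⟩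

    · rintro ⟨q, hq1, hq2, hq3, hq4⟩
      rcases Nat.eq_or_lt_of_le hq1 with h | h
      · subst h; exact absurd ⟨hq3, hq4⟩ hm
      · exact ⟨q, by omega, hq2, hq3, hq4⟩
  | case3 j hj =>
    simp only [Bool.false_eq_true, false_iff]
    rintro ⟨q, hq1, hq2, _⟩; omega

-- B's set membership has the same characterisation
theorem contains_pairs_iff (ref_d2 hyp_d2 : List Int) (a b : Int)
    (_hlen : hyp_d2.length ≤ ref_d2.length) :
    PySem.Set.contains (PySem.Set.ofList (ref_d2.zip hyp_d2)) (a, b) = true ↔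
      ∃ q, q < hyp_d2.length ∧ ref_d2.getD q 0 = a ∧ hyp_d2.getD q 0 = b := by
  rw [PySem.Set.contains_iff, PySem.Set.mem_ofList, List.mem_iff_getElem]
  constructor
  · rintro ⟨q, hq, hval⟩
    rw [List.length_zip] at hq
    refine ⟨q, by omega, ?_, ?_⟩
    · have : (ref_d2.zip hyp_d2)[q] = (ref_d2[q]'(by omega), hyp_d2[q]'(by omega)) := List.getElem_zip
      rw [this] at hval
      simp [List.getD, List.getElem?_eq_getElem (by omega : q < ref_d2.length)]
      exact congrArg Prod.fst hval
    · have : (ref_d2.zip hyp_d2)[q] = (ref_d2[q]'(by omega), hyp_d2[q]'(by omega)) := List.getElem_zip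
      rw [this] at hval
      simp [List.getD, List.getElem?_eq_getElem (by omega : q < hyp_d2.length)]
      exact congrArg Prod.snd hval
  · rintro ⟨q, hq, ha, hb⟩
    refine ⟨q, by rw [List.length_zip]; omega, ?_⟩
    have : (ref_d2.zip hyp_d2)[q]'(by rw [List.length_zip]; omega) = (ref_d2[q]'(by omega), hyp_d2[q]'(by omega)) := List.getElem_zip
    rw [this]
    simp [List.getD, List.getElem?_eq_getElem (by omega : q < ref_d2.length),
          List.getElem?_eq_getElem (by omega : q < hyp_d2.length)] at ha hb ⊢
    exact ⟨ha, hb⟩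

-- hence A's scan and B's membership test agree
theorem aFind_eq_contains (ref_d2 hyp_d2 : List Int) (a b : Int)
    (hlen : hyp_d2.length ≤ ref_d2.length) :
    aFind ref_d2 hyp_d2 a b 0 = PySem.Set.contains (PySem.Set.ofList (ref_d2.zip hyp_d2)) (a, b) := by
  rcases h : PySem.Set.contains (PySem.Set.ofList (ref_d2.zip hyp_d2)) (a, b) with _ | _
  · rw [← Bool.not_eq_true] at h ⊢
    intro hc
    rcases (aFind_iff ref_d2 hyp_d2 a b hlen 0).mp hc with ⟨q, _, hq2, hq3, hq4⟩
    exact h ((contains_pairs_iff ref_d2 hyp_d2 a b hlen).mpr ⟨q, hq2, hq3, hq4⟩)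
  · rcases (contains_pairs_iff ref_d2 hyp_d2 a b hlen).mp h with ⟨q, hq1, hq2, hq3⟩
    exact (aFind_iff ref_d2 hyp_d2 a b hlen 0).mpr ⟨q, by omega, hq1, hq2, hq3⟩

theorem runEnd_le (hyp_d1 : List Int) (v : Int) (j : Nat) (h : j ≤ hyp_d1.length) :
    runEnd hyp_d1 v j ≤ hyp_d1.length := by
  fun_induction runEnd with
  | case1 j hc ih => exact ih (by omega)
  | case2 j hc => exact h

theorem runEnd_all (hyp_d1 : List Int) (v : Int) (j : Nat) :
    ∀ q, j ≤ q → q < runEnd hyp_d1 v j → hyp_d1.getD q 0 = v := by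
  fun_induction runEnd with
  | case1 j hc ih =>
    intro q h1 h2
    rcases Nat.eq_or_lt_of_le h1 with h | h
    · subst h; exact hc.2
    · exact ih q h h2
  | case2 j hc => intro q h1 h2; omega

theorem runEnd_stop (hyp_d1 : List Int) (v : Int) (j : Nat)
    (h : runEnd hyp_d1 v j < hyp_d1.length) : hyp_d1.getD (runEnd hyp_d1 v j) 0 ≠ v := by
  fun_induction runEnd with
  | case1 j hc ih => exact ih h
  | case2 j hc =>
    intro hv
    exact hc ⟨h, hv⟩

-- runEnd reaches e when [j,e) all carry v and the run stops at e
theorem runEnd_eq (hyp_d1 : List Int) (v : Int) (e : Nat)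
    (he : e ≤ hyp_d1.length) (hstop : e = hyp_d1.length ∨ hyp_d1.getD e 0 ≠ v) :
    ∀ j, j ≤ e → (∀ q, j ≤ q → q < e → hyp_d1.getD q 0 = v) → runEnd hyp_d1 v j = e := by
  suffices H : ∀ n j, e - j = n → j ≤ e → (∀ q, j ≤ q → q < e → hyp_d1.getD q 0 = v) →
      runEnd hyp_d1 v j = e by
    exact fun j => H (e - j) j rfl
  intro n
  induction n using Nat.strong_induction_on with
  | _ n ih =>
    intro j hn hje hall
    by_cases hj : j < e
    · conv_lhs => rw [runEnd, if_pos ⟨by omega, hall j (le_refl j) hj⟩]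
      exact ih (e - (j+1)) (by omega) (j+1) rfl (by omega) (fun q h1 h2 => hall q (by omega) h2)
    · have hje' : j = e := by omega
      subst hje'
      rw [runEnd, if_neg]
      rintro ⟨h1, h2⟩
      rcases hstop with h | h
      · omega
      · exact h h2

-- aGo with found = false ignores prev
theorem aGo_prev_irrel (ref_d1 ref_d2 hyp_d1 hyp_d2 : List Int) (i : Nat) (total : Int) (p q : Int) :
    aGo ref_d1 ref_d2 hyp_d1 hyp_d2 i total p false = aGo ref_d1 ref_d2 hyp_d1 hyp_d2 i total q false := by
  conv_lhs => rw [aGo]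
  conv_rhs => rw [aGo]
  simp

-- skipping phase: with found = true and prev = v, A skips to the end of the run of v, then behaves as found = false
theorem aGo_skip (ref_d1 ref_d2 hyp_d1 hyp_d2 : List Int) (v : Int) (i : Nat) (total : Int) :
    aGo ref_d1 ref_d2 hyp_d1 hyp_d2 i total v true =
      aGo ref_d1 ref_d2 hyp_d1 hyp_d2 (runEnd hyp_d1 v i) total v false := by
  fun_induction runEnd hyp_d1 v i with
  | case1 i hc ih =>
    conv_lhs => rw [aGo]
    rw [if_pos hc.1, if_pos ⟨rfl, hc.2⟩]
    exact ih
  | case2 i hc =>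
    by_cases hi : i < hyp_d1.length
    · have hne : ¬ hyp_d1.getD i 0 = v := fun hv => hc ⟨hi, hv⟩
      conv_lhs => rw [aGo]
      conv_rhs => rw [aGo]
      rw [if_pos hi, if_pos hi, if_neg (fun h => hne h.2), if_neg (by simp : ¬ (false = true ∧ hyp_d1.getD i 0 = v))]
    · conv_lhs => rw [aGo]
      conv_rhs => rw [aGo]
      simp [hi]

-- one true element extends an 'any' over a larger range
theorem anyMatch_of_head (pairs : PySem.Set (Int × Int)) (ref_d1 hyp_d1 : List Int) (i j : Nat)
    (hij : i < j) (h : PySem.Set.contains pairs (ref_d1.getD i 0, hyp_d1.getD i 0) = true) :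
    anyMatch pairs ref_d1 hyp_d1 i j = true := by
  unfold anyMatch
  rw [List.any_eq_true]
  exact ⟨i, by rw [List.mem_range'_1]; omega, h⟩

theorem anyMatch_tail (pairs : PySem.Set (Int × Int)) (ref_d1 hyp_d1 : List Int) (i j : Nat)
    (hij : i < j) (h : PySem.Set.contains pairs (ref_d1.getD i 0, hyp_d1.getD i 0) = false) :
    anyMatch pairs ref_d1 hyp_d1 i j = anyMatch pairs ref_d1 hyp_d1 (i+1) j := by
  unfold anyMatch
  have hsplit : List.range' i (j - i) = i :: List.range' (i+1) (j - (i+1)) := by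
    have : j - i = (j - (i+1)) + 1 := by omega
    rw [this, List.range'_succ]
  rw [hsplit]
  simp only [List.any_cons, h, Bool.false_or]

theorem anyMatch_empty (pairs : PySem.Set (Int × Int)) (ref_d1 hyp_d1 : List Int) (j : Nat) :
    anyMatch pairs ref_d1 hyp_d1 j j = false := by
  unfold anyMatch
  simp

-- scanning phase inside one run [p, e): A's sequential scan equals the run-level any
theorem aGo_scan (ref_d1 ref_d2 hyp_d1 hyp_d2 : List Int)
    (hlen : hyp_d2.length ≤ ref_d2.length)
    (v : Int) (e : Nat) (he : e ≤ hyp_d1.length)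
    (hstop : e = hyp_d1.length ∨ hyp_d1.getD e 0 ≠ v) :
    ∀ p, p ≤ e → (∀ q, p ≤ q → q < e → hyp_d1.getD q 0 = v) →
    ∀ total x,
      aGo ref_d1 ref_d2 hyp_d1 hyp_d2 p total x false =
        aGo ref_d1 ref_d2 hyp_d1 hyp_d2 e
          (if anyMatch (PySem.Set.ofList (ref_d2.zip hyp_d2)) ref_d1 hyp_d1 p e then total + 1 else total)
          x false := by
  suffices H : ∀ n p, e - p = n → p ≤ e → (∀ q, p ≤ q → q < e → hyp_d1.getD q 0 = v) →
      ∀ total x,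
        aGo ref_d1 ref_d2 hyp_d1 hyp_d2 p total x false =
          aGo ref_d1 ref_d2 hyp_d1 hyp_d2 e
            (if anyMatch (PySem.Set.ofList (ref_d2.zip hyp_d2)) ref_d1 hyp_d1 p e then total + 1 else total)
            x false by
    exact fun p => H (e - p) p rfl
  intro n
  induction n using Nat.strong_induction_on with
  | _ n ih =>
    intro p hn hpe hval total x
    rcases Nat.eq_or_lt_of_le hpe with heq | hlt
    · subst heq
      rw [anyMatch_empty]
      simp
    · have hp : p < hyp_d1.length := by omega
      have hvp : hyp_d1.getD p 0 = v := hval p (le_refl p) hlt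
      conv_lhs => rw [aGo]
      rw [if_pos hp, if_neg (by simp)]
      rw [aFind_eq_contains ref_d2 hyp_d2 _ _ hlen]
      rcases hcont : PySem.Set.contains (PySem.Set.ofList (ref_d2.zip hyp_d2)) (ref_d1.getD p 0, hyp_d1.getD p 0) with _ | _
      · -- no match at p: continue scanning
        rw [if_neg (by simp : ¬ false = true)]
        rw [anyMatch_tail _ _ _ _ _ hlt hcont]
        rw [aGo_prev_irrel ref_d1 ref_d2 hyp_d1 hyp_d2 (p+1) total (hyp_d1.getD p 0) x]
        exact ih (e - (p+1)) (by omega) (p+1) rfl (by omega) (fun q h1 h2 => hval q (by omega) h2) total x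
      · -- match at p: count, skip to end of run
        rw [if_pos rfl]
        rw [hvp, aGo_skip,
            runEnd_eq hyp_d1 v e he hstop (p+1) (by omega) (fun q h1 h2 => hval q (by omega) h2)]
        rw [anyMatch_of_head _ _ _ _ _ hlt hcont, if_pos rfl]
        exact aGo_prev_irrel ref_d1 ref_d2 hyp_d1 hyp_d2 e (total + 1) v x

-- main loop equivalence
theorem aGo_eq_bGo (ref_d1 ref_d2 hyp_d1 hyp_d2 : List Int)
    (hlen : hyp_d2.length ≤ ref_d2.length) :
    ∀ i total x, i ≤ hyp_d1.length →
      aGo ref_d1 ref_d2 hyp_d1 hyp_d2 i total x false =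
        bGo (PySem.Set.ofList (ref_d2.zip hyp_d2)) ref_d1 hyp_d1 i total := by
  suffices H : ∀ n i, hyp_d1.length - i = n → ∀ total x, i ≤ hyp_d1.length →
      aGo ref_d1 ref_d2 hyp_d1 hyp_d2 i total x false =
        bGo (PySem.Set.ofList (ref_d2.zip hyp_d2)) ref_d1 hyp_d1 i total by
    exact fun i => H (hyp_d1.length - i) i rfl
  intro n
  induction n using Nat.strong_induction_on with
  | _ n ih =>
    intro i hn total x hi
    by_cases hlt : i < hyp_d1.length
    · set v := hyp_d1.getD i 0 with hv
      set e := runEnd hyp_d1 v (i+1) with he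
      have he1 : i + 1 ≤ e := le_runEnd hyp_d1 v (i+1)
      have he2 : e ≤ hyp_d1.length := runEnd_le hyp_d1 v (i+1) (by omega)
      have hall : ∀ q, i ≤ q → q < e → hyp_d1.getD q 0 = v := by
        intro q h1 h2
        rcases Nat.eq_or_lt_of_le h1 with h | h
        · subst h; rfl
        · exact runEnd_all hyp_d1 v (i+1) q (by omega) h2
      have hstop : e = hyp_d1.length ∨ hyp_d1.getD e 0 ≠ v := by
        by_cases hel : e < hyp_d1.length
        · exact Or.inr (runEnd_stop hyp_d1 v (i+1) hel)
        · exact Or.inl (by omega)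
      rw [aGo_scan ref_d1 ref_d2 hyp_d1 hyp_d2 hlen v e he2 hstop i (by omega) hall total x]
      rw [ih (hyp_d1.length - e) (by omega) e rfl _ x he2]
      conv_rhs => rw [bGo, if_pos hlt]
    · conv_lhs => rw [aGo, if_neg hlt]
      conv_rhs => rw [bGo, if_neg hlt]

-- ===== VERDICT (by name: the statement is the Claim_ definition above) =====
theorem count_cross_doc_topics_spec : Claim_equal_count_cross_doc_topics := by
  intro ref_d1 ref_d2 hyp_d1 hyp_d2 _ hpre
  unfold Spec_count_cross_doc_topics count_cross_doc_topics count_cross_doc_topics_alt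
  exact aGo_eq_bGo ref_d1 ref_d2 hyp_d1 hyp_d2 hpre.2.2 0 0 (hyp_d1.getD 0 0) (by omega)
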